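-- pv_equiv track=rewrite | github.com/huangwenze/STRIDE | STRIDE_com.py | define_state
-- ===== SOURCE A (Python) =====
-- def define_state(sdict, pdict, rlength, length1):
--     pdict2 = {}
--     for sid in sdict:
--         sequence, length, trx_id, gene_id = sdict[sid][0], sdict[sid][1], sdict[sid][2], sdict[sid][3]
--         if sid in pdict:
--             pdict2[sid] = {}
--             for k in pdict[sid]:
--                 r = int(k / rlength)
--                 if r in pdict2[sid]:
--                     pdict2[sid][r].append(k)
--                 else:
--                     pdict2[sid][r] = [k]
--     pdict3 = {}
--     for sid in pdict2:
--         pdict3[sid] = {}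
--         dict1 = pdict2[sid]
--         dict2 = {k: v for k, v in sorted(dict1.items(), key=lambda item: item[0])}
--         start_p = 0
--         for kk in dict2:
--             sent1 = dict2[kk]
--             dict3 = {}
--             for ke in sent1:
--                 dict3[ke] = pdict[sid][ke][1]
--             dict4 = {k: v for k, v in sorted(dict3.items(), key=lambda item: item[1], reverse = True)}
--             #dict4 = {k: v for k, v in sorted(dict3.items(), key=lambda item: item[1])}
--             for k in dict4:
--                 if k >= start_p + 5:
--                     start_p = start_p + length1
--                     pdict3[sid][k] = pdict[sid][k]
--                     break
--     return pdict3
-- ===== SOURCE B (Python) =====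
-- def define_state(sdict, pdict, rlength, length1):
--     pdict3 = {}
--     for sid in sdict:
--         # kept from the original interface: these fields are unused, but reading them keeps
--         # the same behaviour on malformed sdict entries (IndexError on short value lists)
--         sequence, length, trx_id, gene_id = sdict[sid][0], sdict[sid][1], sdict[sid][2], sdict[sid][3]
--         if sid not in pdict:
--             continue
--         entries = pdict[sid]
--         buckets = {}
--         for k in entries:
--             buckets.setdefault(int(k / rlength), []).append(k)
--         sel = {}
--         start_p = 0
--         for r in sorted(buckets):
--             best = None
--             for k in buckets[r]:
--                 if k >= start_p + 5 and (best is None or entries[k][1] > entries[best][1]):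
--                     best = k
--             if best is not None:
--                 sel[best] = entries[best]
--                 start_p += length1
--         pdict3[sid] = sel
--     return pdict3
-- ===== Notes on version B (the rewrite author's own statement) =====
-- stated objective: alternative
-- what changed: B selects each bucket's entry by a single linear best-candidate scan (strictly-greater replacement reproduces the stable sort's first-max tie-breaking) instead of A's per-bucket dict-of-values construction plus stable sort by value descending plus first-match loop, and it sorts only bucket keys rather than key-value item pairs.
import Mathlib
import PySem

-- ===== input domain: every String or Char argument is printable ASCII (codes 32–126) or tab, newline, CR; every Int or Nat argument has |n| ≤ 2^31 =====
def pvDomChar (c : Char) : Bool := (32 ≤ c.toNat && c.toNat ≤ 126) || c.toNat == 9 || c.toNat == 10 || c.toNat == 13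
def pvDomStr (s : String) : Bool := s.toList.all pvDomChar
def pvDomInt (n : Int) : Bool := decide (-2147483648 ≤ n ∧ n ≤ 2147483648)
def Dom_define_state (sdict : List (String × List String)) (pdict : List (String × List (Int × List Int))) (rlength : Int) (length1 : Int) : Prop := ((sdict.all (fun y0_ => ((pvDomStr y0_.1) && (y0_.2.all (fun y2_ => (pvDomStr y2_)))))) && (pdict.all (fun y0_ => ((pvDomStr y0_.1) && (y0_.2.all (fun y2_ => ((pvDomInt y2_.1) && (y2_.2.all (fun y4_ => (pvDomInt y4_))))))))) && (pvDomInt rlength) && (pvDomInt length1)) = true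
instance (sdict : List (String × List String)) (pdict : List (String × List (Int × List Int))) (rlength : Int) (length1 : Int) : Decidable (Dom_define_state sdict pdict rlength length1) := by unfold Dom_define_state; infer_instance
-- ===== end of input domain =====

-- B replaces A's per-bucket sort-by-value-then-first-match selection by a single linear
-- best-candidate scan per bucket (and sorts bucket keys instead of bucket items): alternative algorithm, same result.

-- ===== PORT A =====
-- literal transliteration of A; int(k / rlength) is PySem.Int.truncdiv (exact for |k|,|rlength| ≤ 2^31);
-- the unused unpacking 'sequence, length, trx_id, gene_id = sdict[sid][0..3]' is kept as unused pyGet? bindings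
-- (under Pre_ they succeed in Python and do not influence the result).
def define_state (sdict : List (String × List String)) (pdict : List (String × List (Int × List Int))) (rlength : Int) (length1 : Int) : List (String × List (Int × List Int)) :=
  let sd : PySem.Dict String (List String) := PySem.Dict.ofList sdict
  let pd : PySem.Dict String (List (Int × List Int)) := PySem.Dict.ofList pdict
  let pdict2 : PySem.Dict String (PySem.Dict Int (List Int)) :=
    sd.keys.foldl (fun p2 sid =>
      let _sequence := PySem.List.pyGet? (sd.getD sid []) 0
      let _length := PySem.List.pyGet? (sd.getD sid []) 1
      let _trx_id := PySem.List.pyGet? (sd.getD sid []) 2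
      let _gene_id := PySem.List.pyGet? (sd.getD sid []) 3
      if pd.contains sid then
        let inner : PySem.Dict Int (List Int) := PySem.Dict.ofList (pd.getD sid [])
        let bucket : PySem.Dict Int (List Int) :=
          inner.keys.foldl (fun b k =>
            let r := PySem.Int.truncdiv k rlength
            if b.contains r then b.modify r [] (fun v => v ++ [k]) else b.insert r [k]) PySem.Dict.empty
        p2.insert sid bucket
      else p2) PySem.Dict.empty
  let pdict3 : PySem.Dict String (PySem.Dict Int (List Int)) :=
    pdict2.keys.foldl (fun p3 sid =>
      let pinner : PySem.Dict Int (List Int) := PySem.Dict.ofList (pd.getD sid [])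
      let dict1 := pdict2.getD sid PySem.Dict.empty
      let dict2 : PySem.Dict Int (List Int) :=
        PySem.Dict.ofList (PySem.List.sorted dict1.items (fun item => item.1) false)
      let inner3 := (dict2.items.foldl (fun (acc : PySem.Dict Int (List Int) × Int) kv =>
        let sent1 := kv.2
        let dict3 : PySem.Dict Int Int :=
          sent1.foldl (fun d ke => d.insert ke (PySem.List.pyGetD (pinner.getD ke []) 1 0)) PySem.Dict.empty
        let dict4 : PySem.Dict Int Int :=
          PySem.Dict.ofList (PySem.List.sorted dict3.items (fun item => item.2) true)
        match dict4.keys.find? (fun k => decide (acc.2 + 5 ≤ k)) with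
        | some k => (acc.1.insert k (pinner.getD k []), acc.2 + length1)
        | none => acc) (PySem.Dict.empty, 0)).1
      p3.insert sid inner3) PySem.Dict.empty
  pdict3.items.map (fun p => (p.1, p.2.items))

-- ===== PORT B =====
-- literal transliteration of Source B: group keys into buckets with setdefault/append (= Dict.modify),
-- walk bucket indices in ascending order, pick per bucket the best eligible key by one linear scan;
-- Source B keeps A's unused unpacking (so malformed sdict entries raise identically), ported as unused bindings.
def define_state_alt (sdict : List (String × List String)) (pdict : List (String × List (Int × List Int))) (rlength : Int) (length1 : Int) : List (String × List (Int × List Int)) :=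
  let sd : PySem.Dict String (List String) := PySem.Dict.ofList sdict
  let pd : PySem.Dict String (List (Int × List Int)) := PySem.Dict.ofList pdict
  sd.keys.foldl (fun out sid =>
    let _sequence := PySem.List.pyGet? (sd.getD sid []) 0
    let _length := PySem.List.pyGet? (sd.getD sid []) 1
    let _trx_id := PySem.List.pyGet? (sd.getD sid []) 2
    let _gene_id := PySem.List.pyGet? (sd.getD sid []) 3
    if pd.contains sid then
      let entries : PySem.Dict Int (List Int) := PySem.Dict.ofList (pd.getD sid [])
      let buckets : PySem.Dict Int (List Int) :=
        entries.keys.foldl (fun b k => b.modify (PySem.Int.truncdiv k rlength) [] (fun v => v ++ [k])) PySem.Dict.empty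
      let rs := PySem.List.sorted buckets.keys (fun r => r) false
      let sel := (rs.foldl (fun (acc : PySem.Dict Int (List Int) × Int) r =>
          let best := (buckets.getD r []).foldl (fun best k =>
            if (decide (acc.2 + 5 ≤ k) && (match best with
              | none => true
              | some b => decide (PySem.List.pyGetD (entries.getD b []) 1 0 < PySem.List.pyGetD (entries.getD k []) 1 0)))
            then some k else best) none
          match best with
          | some b => (acc.1.insert b (entries.getD b []), acc.2 + length1)
          | none => acc) (PySem.Dict.empty, 0)).1
      out ++ [(sid, sel.items)]
    else out) []

-- ===== PRECONDITION & SPEC =====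
-- Pre_ excludes exactly the inputs where Python A raises: a sdict value with fewer than 4 fields
-- (IndexError in the unpacking), rlength = 0 while some shared sid has positions (ZeroDivisionError),
-- or a position value list with fewer than 2 entries for a shared sid (IndexError at [1]).
def Pre_define_state (sdict : List (String × List String)) (pdict : List (String × List (Int × List Int))) (rlength : Int) (length1 : Int) : Prop :=
  (∀ p ∈ (PySem.Dict.ofList sdict).items, 4 ≤ p.2.length) ∧
  (rlength = 0 → ∀ p ∈ (PySem.Dict.ofList sdict).items,
      (PySem.Dict.ofList pdict).contains p.1 → (PySem.Dict.ofList pdict).getD p.1 [] = []) ∧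
  (∀ p ∈ (PySem.Dict.ofList sdict).items, (PySem.Dict.ofList pdict).contains p.1 →
      ∀ kv ∈ (PySem.Dict.ofList ((PySem.Dict.ofList pdict).getD p.1 [])).items, 2 ≤ kv.2.length)
instance (sdict : List (String × List String)) (pdict : List (String × List (Int × List Int))) (rlength : Int) (length1 : Int) : Decidable (Pre_define_state sdict pdict rlength length1) := by unfold Pre_define_state; infer_instance
def pvWitness_define_state : (List (String × List String)) × (List (String × List (Int × List Int))) × Int × Int :=
  ([("a", ["s", "4", "t", "g"])], [("a", [(0, [1, 2]), (7, [1, 9]), (8, [0, 3])])], 3, 10)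
def Spec_define_state (sdict : List (String × List String)) (pdict : List (String × List (Int × List Int))) (rlength : Int) (length1 : Int) (out : List (String × List (Int × List Int))) : Prop := out = define_state_alt sdict pdict rlength length1
instance (sdict : List (String × List String)) (pdict : List (String × List (Int × List Int))) (rlength : Int) (length1 : Int) (out : List (String × List (Int × List Int))) : Decidable (Spec_define_state sdict pdict rlength length1 out) := by unfold Spec_define_state; infer_instance

-- ===== CLAIM (what is proved, stated in full; the proofs are below) =====
def Claim_equal_define_state : Prop := ∀ (sdict : List (String × List String)) (pdict : List (String × List (Int × List Int))) (rlength : Int) (length1 : Int), Dom_define_state sdict pdict rlength length1 → Pre_define_state sdict pdict rlength length1 → Spec_define_state sdict pdict rlength length1 (define_state sdict pdict rlength length1)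

-- ===== LEMMAS AND PROOFS =====

-- A's 'if r in bucket then append else start [k]' is exactly one Dict.modify.
theorem pv_bucket_if_eq (b : PySem.Dict Int (List Int)) (r k : Int) :
    (if b.contains r then b.modify r [] (fun v => v ++ [k]) else b.insert r [k])
      = b.modify r [] (fun v => v ++ [k]) := by
  by_cases h : b.contains r
  · simp [h]
  · simp [h, PySem.Dict.modify, PySem.Dict.getD_of_not_contains b [] (by simpa using h)]

-- a conditional-insert loop is an insert loop over the filtered list
theorem pv_foldl_if_insert {κ ν : Type} [BEq κ] (c : κ → Bool) (f : κ → ν) :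
    ∀ (l : List κ) (d : PySem.Dict κ ν),
    l.foldl (fun p2 sid => if c sid then p2.insert sid (f sid) else p2) d
      = (l.filter c).foldl (fun p2 sid => p2.insert sid (f sid)) d := by
  intro l
  induction l with
  | nil => intro d; rfl
  | cons x xs ih =>
    intro d
    by_cases h : c x <;> simp [h, ih]

-- a dict literal with distinct keys keeps its item list
theorem pv_items_ofList {κ ν : Type} [BEq κ] [LawfulBEq κ] (l : List (κ × ν))
    (h : (l.map Prod.fst).Nodup) : (PySem.Dict.ofList l).items = l := by
  have := PySem.Dict.items_foldl_insert_fresh l Prod.fst Prod.snd PySem.Dict.empty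
    (by intro a _; simp [PySem.Dict.contains_empty]) h
  simpa [PySem.Dict.ofList, PySem.Dict.update, PySem.Dict.empty] using this

-- insertBy splits at the first element the new one goes before
theorem pv_insertBy_eq {α : Type} (before : α → α → Bool) (x : α) :
    ∀ (s : List α), PySem.List.insertBy before x s
      = s.takeWhile (fun y => !before x y) ++ x :: s.dropWhile (fun y => !before x y) := by
  intro s
  induction s with
  | nil => rfl
  | cons y ys ih =>
    by_cases h : before x y <;> simp [PySem.List.insertBy, h, ih]

theorem pv_sorted_rev_append_singleton {α κ : Type} [LT κ] [DecidableLT κ]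
    (l : List α) (p : α) (key : α → κ) :
    PySem.List.sorted (l ++ [p]) key true
      = PySem.List.insertBy (fun a b => decide (key b < key a)) p (PySem.List.sorted l key true) := by
  simp [PySem.List.sorted, List.foldl_append]

-- every element of the dropped suffix has value strictly below p.2 (on a descending list)
theorem pv_dropWhile_lt (p : Int × Int) :
    ∀ (s : List (Int × Int)), s.Pairwise (fun a b => b.2 ≤ a.2) →
    ∀ y ∈ s.dropWhile (fun y => !decide (y.2 < p.2)), y.2 < p.2 := by
  intro s
  induction s with
  | nil => intro _ y hy; simp at hy
  | cons a s' ih =>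
    intro hp y hy
    by_cases h : a.2 < p.2
    · simp [h] at hy
      rcases hy with rfl | hy
      · exact h
      · exact lt_of_le_of_lt (List.rel_of_pairwise_cons hp hy) h
    · simp only [List.dropWhile_cons] at hy
      rw [if_pos (by simp [h])] at hy
      exact ih hp.of_cons y hy

-- the heart: first eligible entry of the stable value-descending sort = linear best scan
theorem pv_find_desc_eq_scan (c : Int) (l : List (Int × Int)) :
    List.find? (fun it => decide (c ≤ it.1)) (PySem.List.sorted l (fun it => it.2) true)
      = l.foldl (fun best it =>
          if (decide (c ≤ it.1) && (match best with
            | none => true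
            | some b => decide (b.2 < it.2))) then some it else best) none := by
  induction l using List.reverseRecOn with
  | nil => rfl
  | append_singleton l p ih =>
    rw [pv_sorted_rev_append_singleton, pv_insertBy_eq, List.foldl_append]
    set s := PySem.List.sorted l (fun it => it.2) true with hs
    have hpair : s.Pairwise (fun a b => b.2 ≤ a.2) := PySem.List.sorted_pairwise_rev l _
    have hsplit : s.takeWhile (fun y => !decide (y.2 < p.2)) ++ s.dropWhile (fun y => !decide (y.2 < p.2)) = s :=
      List.takeWhile_append_dropWhile
    have hfs : List.find? (fun it => decide (c ≤ it.1)) s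
        = ((List.find? (fun it => decide (c ≤ it.1)) (s.takeWhile (fun y => !decide (y.2 < p.2)))).or
           (List.find? (fun it => decide (c ≤ it.1)) (s.dropWhile (fun y => !decide (y.2 < p.2))))) := by
      conv_lhs => rw [← hsplit]
      exact List.find?_append
    rw [List.find?_append, ← ih, hfs]
    simp only [List.foldl_cons, List.foldl_nil]
    rcases h1 : List.find? (fun it => decide (c ≤ it.1)) (s.takeWhile (fun y => !decide (y.2 < p.2))) with _ | b
    · -- nothing eligible before p's slot
      rcases h2 : List.find? (fun it => decide (c ≤ it.1)) (s.dropWhile (fun y => !decide (y.2 < p.2))) with _ | b2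
      · by_cases hp : c ≤ p.1 <;> simp [hp, h1, h2]
      · have hb2 : b2.2 < p.2 :=
          pv_dropWhile_lt p s hpair b2 (List.mem_of_find?_eq_some h2)
        by_cases hp : c ≤ p.1 <;> simp [hp, hb2, h1, h2]
    · -- an eligible entry with value ≥ p.2 precedes p: it stays the answer
      have hb : ¬ b.2 < p.2 := by
        have hmem := List.mem_of_find?_eq_some h1
        have := List.mem_takeWhile_imp hmem
        simpa using this
      simp [hb, h1]

-- the best-scan over keys mirrors the best-scan over (key, value) pairs
theorem pv_scan_map (val : Int → Int) (c : Int) :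
    ∀ (sent : List Int) (acc : Option Int),
    (sent.map (fun k => (k, val k))).foldl (fun best it =>
        if (decide (c ≤ it.1) && (match best with
          | none => true
          | some b => decide (b.2 < it.2))) then some it else best) (acc.map (fun k => (k, val k)))
      = (sent.foldl (fun best k =>
          if (decide (c ≤ k) && (match best with
            | none => true
            | some b => decide (val b < val k))) then some k else best) acc).map (fun k => (k, val k)) := by
  intro sent
  induction sent with
  | nil => intro acc; rfl
  | cons k sent' ih =>
    intro acc
    simp only [List.map_cons, List.foldl_cons]
    rcases acc with _ | b
    · by_cases h : decide (c ≤ k) = true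
      · simpa [h] using ih (some k)
      · simpa [h] using ih none
    · simp only [Option.map_some]
      by_cases h : (decide (c ≤ k) && decide (val b < val k)) = true
      · simpa [h] using ih (some k)
      · simpa [h] using ih (some b)

-- per-bucket step of A (build value dict, sort by value descending, take first eligible key)
-- equals per-bucket step of B (linear best scan)
theorem pv_step_eq (entries : PySem.Dict Int (List Int)) (sent : List Int) (hs : sent.Nodup) (c : Int) :
    (PySem.Dict.ofList (PySem.List.sorted
        (sent.foldl (fun d ke => d.insert ke (PySem.List.pyGetD (entries.getD ke []) 1 0)) PySem.Dict.empty).items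
        (fun item => item.2) true)).keys.find? (fun k => decide (c ≤ k))
      = sent.foldl (fun best k =>
          if (decide (c ≤ k) && (match best with
            | none => true
            | some b => decide (PySem.List.pyGetD (entries.getD b []) 1 0 < PySem.List.pyGetD (entries.getD k []) 1 0)))
          then some k else best) none := by
  set val : Int → Int := fun ke => PySem.List.pyGetD (entries.getD ke []) 1 0 with hval
  have hitems : (sent.foldl (fun d ke => d.insert ke (val ke)) PySem.Dict.empty).items
      = sent.map (fun ke => (ke, val ke)) := by
    have := PySem.Dict.items_foldl_insert_fresh sent (fun ke => ke) val PySem.Dict.empty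
      (by intro a _; simp [PySem.Dict.contains_empty]) (by simpa using hs)
    simpa [PySem.Dict.empty] using this
  rw [hitems]
  have hnodupfst : ((PySem.List.sorted (sent.map (fun ke => (ke, val ke))) (fun item => item.2) true).map (fun x => x.1)).Nodup := by
    have hperm : (PySem.List.sorted (sent.map (fun ke => (ke, val ke))) (fun item => item.2) true).Perm
        (sent.map (fun ke => (ke, val ke))) := PySem.List.sorted_perm _ _ _
    apply (hperm.map (fun x => x.1)).nodup_iff.mpr
    simpa [List.map_map, Function.comp_def] using hs
  rw [PySem.Dict.keys,
    pv_items_ofList _ (by simpa [Function.comp_def] using hnodupfst),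
    List.find?_map]
  have hcomp : ((fun k => decide (c ≤ k)) ∘ (fun x : Int × Int => x.1)) = (fun it : Int × Int => decide (c ≤ it.1)) := rfl
  rw [hcomp, pv_find_desc_eq_scan c (sent.map (fun ke => (ke, val ke)))]
  have hbridge := pv_scan_map val c sent none
  simp only [Option.map_none] at hbridge
  rw [hbridge]
  simp [Option.map_map, Function.comp_def, hval]

-- the per-sid inner computation of A equals B's (dict1 already rewritten to the bucket dict)
theorem pv_inner_eq (entries_list : List (Int × List Int)) (rlength length1 : Int) :
    ((PySem.Dict.ofList (PySem.List.sorted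
        ((PySem.Dict.ofList entries_list).keys.foldl
           (fun b k => b.modify (PySem.Int.truncdiv k rlength) [] (fun v => v ++ [k])) PySem.Dict.empty).items
        (fun item => item.1) false)).items.foldl
      (fun (acc : PySem.Dict Int (List Int) × Int) kv =>
        match (PySem.Dict.ofList (PySem.List.sorted
            (kv.2.foldl (fun d ke => d.insert ke (PySem.List.pyGetD ((PySem.Dict.ofList entries_list).getD ke []) 1 0)) PySem.Dict.empty).items
            (fun item => item.2) true)).keys.find? (fun k => decide (acc.2 + 5 ≤ k)) with
        | some k => (acc.1.insert k ((PySem.Dict.ofList entries_list).getD k []), acc.2 + length1)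
        | none => acc) (PySem.Dict.empty, 0)).1
    = ((PySem.List.sorted ((PySem.Dict.ofList entries_list).keys.foldl
           (fun b k => b.modify (PySem.Int.truncdiv k rlength) [] (fun v => v ++ [k])) PySem.Dict.empty).keys (fun r => r) false).foldl
        (fun (acc : PySem.Dict Int (List Int) × Int) r =>
          match (((PySem.Dict.ofList entries_list).keys.foldl
              (fun b k => b.modify (PySem.Int.truncdiv k rlength) [] (fun v => v ++ [k])) PySem.Dict.empty).getD r []).foldl
              (fun best k => if (decide (acc.2 + 5 ≤ k) && (match best with
                 | none => true
                 | some b => decide (PySem.List.pyGetD ((PySem.Dict.ofList entries_list).getD b []) 1 0 < PySem.List.pyGetD ((PySem.Dict.ofList entries_list).getD k []) 1 0)))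
               then some k else best) none with
          | some b => (acc.1.insert b ((PySem.Dict.ofList entries_list).getD b []), acc.2 + length1)
          | none => acc) (PySem.Dict.empty, 0)).1 := by
  set pinner : PySem.Dict Int (List Int) := PySem.Dict.ofList entries_list with hpinner
  set bk : PySem.Dict Int (List Int) :=
    pinner.keys.foldl (fun b k => b.modify (PySem.Int.truncdiv k rlength) [] (fun v => v ++ [k])) PySem.Dict.empty with hbk
  have hkeysnodup : pinner.keys.Nodup := PySem.Dict.nodup_keys_ofList entries_list
  have hbkfold : bk = (pinner.keys.map (fun k => (PySem.Int.truncdiv k rlength, k))).foldl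
      (fun d p => d.modify p.1 [] (fun v => v ++ [p.2])) PySem.Dict.empty := by
    rw [hbk, List.foldl_map]
  have hgetD : ∀ r : Int, bk.getD r [] = pinner.keys.filter (fun k => PySem.Int.truncdiv k rlength == r) := by
    intro r
    rw [hbkfold, PySem.Dict.getD_foldl_modify_append]
    simp [PySem.Dict.getD_empty, List.filter_map, Function.comp_def]
  have hsentnodup : ∀ r : Int, (bk.getD r []).Nodup := by
    intro r; rw [hgetD r]; exact hkeysnodup.filter _
  have hbknodup : bk.keys.Nodup := by
    rw [hbk]
    exact PySem.Dict.nodup_keys_foldl_modify_key pinner.keys (fun k => PySem.Int.truncdiv k rlength) []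
      (fun _ k v => v ++ [k]) PySem.Dict.empty (by simp [PySem.Dict.keys_empty])
  set ys := PySem.List.sorted bk.keys (fun r => r) false with hys
  have hysperm : ys.Perm bk.keys := PySem.List.sorted_perm _ _ _
  have hysnodup : ys.Nodup := hysperm.nodup_iff.mpr hbknodup
  have hyslt : ys.Pairwise (· < ·) := by
    have hle : ys.Pairwise (fun a b => a ≤ b) := PySem.List.sorted_pairwise bk.keys (fun r => r)
    have hne : ys.Pairwise (· ≠ ·) := hysnodup
    exact (hle.and hne).imp (fun h => lt_of_le_of_ne h.1 h.2)
  have hitems : bk.items = bk.keys.map (fun r => (r, bk.getD r [])) :=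
    PySem.Dict.items_eq_map_keys bk hbknodup []
  have hsorted : PySem.List.sorted bk.items (fun item => item.1) false
      = ys.map (fun r => (r, bk.getD r [])) := by
    apply PySem.List.sorted_eq_of_perm_of_pairwise_lt
    · rw [hitems]; exact hysperm.map _
    · exact (List.pairwise_map).mpr (by simpa using hyslt)
  have hd2nodup : ((ys.map (fun r => (r, bk.getD r []))).map Prod.fst).Nodup := by
    simpa [List.map_map, Function.comp_def] using hysnodup
  rw [hsorted, pv_items_ofList _ hd2nodup, List.foldl_map]
  refine congrArg Prod.fst (congrArg
    (fun f => List.foldl f ((PySem.Dict.empty : PySem.Dict Int (List Int)), (0 : Int)) ys) ?_)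
  funext acc r
  show (match (PySem.Dict.ofList (PySem.List.sorted
            ((bk.getD r []).foldl (fun d ke => d.insert ke (PySem.List.pyGetD (pinner.getD ke []) 1 0)) PySem.Dict.empty).items
            (fun item => item.2) true)).keys.find? (fun k => decide (acc.2 + 5 ≤ k)) with
        | some k => (acc.1.insert k (pinner.getD k []), acc.2 + length1)
        | none => acc)
      = _
  rw [pv_step_eq pinner (bk.getD r []) (hsentnodup r) (acc.2 + 5)]

-- the items of an insert loop over distinct fresh keys
theorem pv_items_insert_loop {ν : Type} (l : List String) (hl : l.Nodup) (v : String → ν) :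
    (l.foldl (fun d a => d.insert a (v a)) PySem.Dict.empty).items = l.map (fun a => (a, v a)) := by
  have := PySem.Dict.items_foldl_insert_fresh l (fun a => a) v PySem.Dict.empty
    (by intro a _; simp [PySem.Dict.contains_empty]) (by simpa using hl)
  simpa [PySem.Dict.empty] using this

-- ===== VERDICT (by name: the statement is the Claim_ definition above) =====
theorem define_state_spec : Claim_equal_define_state := by
  intro sdict pdict rlength length1 _hdom _hpre
  unfold Spec_define_state define_state define_state_alt
  simp only [pv_bucket_if_eq]
  set sd : PySem.Dict String (List String) := PySem.Dict.ofList sdict with hsd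
  set pd : PySem.Dict String (List (Int × List Int)) := PySem.Dict.ofList pdict with hpd
  rw [pv_foldl_if_insert]
  set fl := sd.keys.filter (fun sid => pd.contains sid) with hfl
  have hflnodup : fl.Nodup := (PySem.Dict.nodup_keys_ofList sdict).filter _
  set P2 : PySem.Dict String (PySem.Dict Int (List Int)) :=
    fl.foldl (fun p2 sid => p2.insert sid ((PySem.Dict.ofList (pd.getD sid [])).keys.foldl
      (fun b k => b.modify (PySem.Int.truncdiv k rlength) [] (fun v => v ++ [k])) PySem.Dict.empty)) PySem.Dict.empty with hP2
  have hP2items : P2.items = fl.map (fun sid => (sid, ((PySem.Dict.ofList (pd.getD sid [])).keys.foldl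
      (fun b k => b.modify (PySem.Int.truncdiv k rlength) [] (fun v => v ++ [k])) PySem.Dict.empty))) := by
    rw [hP2]; exact pv_items_insert_loop fl hflnodup _
  have hP2keys : P2.keys = fl := by
    rw [PySem.Dict.keys, hP2items, List.map_map]
    simp [Function.comp_def]
  have hP2nodup : P2.keys.Nodup := by rw [hP2keys]; exact hflnodup
  have hgetD : ∀ sid ∈ fl, P2.getD sid PySem.Dict.empty
      = ((PySem.Dict.ofList (pd.getD sid [])).keys.foldl
      (fun b k => b.modify (PySem.Int.truncdiv k rlength) [] (fun v => v ++ [k])) PySem.Dict.empty) := by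
    intro sid hmem
    apply PySem.Dict.getD_of_mem_items _ _ hP2nodup
    rw [hP2items]
    exact List.mem_map_of_mem hmem
  rw [pv_items_insert_loop P2.keys hP2nodup, hP2keys, List.map_map,
    PySem.List.foldl_append_if (fun sid => pd.contains sid), ← hfl]
  apply List.map_congr_left
  intro sid hmem
  simp only [Function.comp_def]
  rw [hgetD sid hmem]
  exact congrArg (fun d : PySem.Dict Int (List Int) => (sid, d.items))
    (pv_inner_eq (pd.getD sid []) rlength length1)
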